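-- pv_equiv track=rewrite | github.com/carlosnetto/x9.150-py | test_data.py | _invalid_network_structure
-- ===== SOURCE A (Python) =====
-- NETWORK_DEFINITIONS = {
--     "FedNow": "banking",
--     "RTP": "banking",
--     "ACH": "banking",
--     "Zelle": "zelle",
--     "Pix": "pix",
--     "Base": "evm",
--     "Solana": "solana",
--     "Ethereum": "evm",
--     "Polygon": "evm"
-- }
--
-- def _invalid_network_structure(data):
--     # Corrupts a network definition by adding fields that don't belong to its type
--     # e.g. Adding routingNumber to Pix, or address to Zelle.
--     # This tests if the validator catches structural violations that OpenAPI might allow.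
--     corrupted = False
--     for method in data.get("paymentMethods", []):
--         networks = method.get("networks", {})
--         for net in networks:
--             net_type = NETWORK_DEFINITIONS.get(net)
--             if net_type == "pix":
--                 networks[net]["routingNumber"] = "123456789" # Invalid for Pix
--                 corrupted = True
--             elif net_type == "evm":
--                 networks[net]["routingNumber"] = "123456789" # Invalid for EVM
--                 corrupted = True
--             elif net_type == "solana":
--                 networks[net]["routingNumber"] = "123456789" # Invalid for Solana
--                 corrupted = True
--             elif net_type == "zelle":
--                 networks[net]["address"] = "0x1234567890abcdef" # Invalid for Zelle
--                 corrupted = True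
--
--             if corrupted: break
--         if corrupted: break
--
--     if not corrupted:
--         # If no suitable network found, force inject a bad Pix rail
--         if "paymentMethods" in data and len(data["paymentMethods"]) > 0:
--             data["paymentMethods"][0]["networks"]["Pix"] = {"key": "123", "keyType": "email", "routingNumber": "999"}
--
--     return data
-- ===== SOURCE B (Python) =====
-- NETWORK_DEFINITIONS = {
--     "FedNow": "banking",
--     "RTP": "banking",
--     "ACH": "banking",
--     "Zelle": "zelle",
--     "Pix": "pix",
--     "Base": "evm",
--     "Solana": "solana",
--     "Ethereum": "evm",
--     "Polygon": "evm"
-- }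
--
-- _BAD_PIX = {"key": "123", "keyType": "email", "routingNumber": "999"}
--
--
-- def _corruption(t):
--     # the invalid (field, value) to inject for a corruptible network type, else None
--     if t == "zelle":
--         return ("address", "0x1234567890abcdef")
--     if t in ("pix", "evm", "solana"):
--         return ("routingNumber", "123456789")
--     return None
--
--
-- def _invalid_network_structure(data):
--     # Pure two-stage rebuild (no in-place mutation, no breaks):
--     # stage 1 collects ALL corruptible coordinates, stage 2 rebuilds the structure
--     # functionally around the first one.
--     methods = data.get("paymentMethods", [])
--     hits = [(i, j)
--             for i, m in enumerate(methods)
--             for j, net in enumerate(m.get("networks", {}))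
--             if _corruption(NETWORK_DEFINITIONS.get(net)) is not None]
--     if hits:
--         i, j = hits[0]
--
--         def fix_net(jj, net, det):
--             if jj != j:
--                 return (net, det)
--             field, value = _corruption(NETWORK_DEFINITIONS.get(net))
--             return (net, {**det, field: value})
--
--         new_methods = [
--             {**m, "networks": dict(fix_net(jj, net, det)
--                                    for jj, (net, det) in enumerate(m["networks"].items()))}
--             if ii == i else m
--             for ii, m in enumerate(methods)]
--         return {**data, "paymentMethods": new_methods}
--     if "paymentMethods" in data and len(methods) > 0:
--         m0 = methods[0]
--         new0 = {**m0, "networks": {**m0["networks"],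
--                                    "Pix": dict(_BAD_PIX)}}
--         return {**data, "paymentMethods": [new0] + methods[1:]}
--     return data
-- ===== Notes on version B (the rewrite author's own statement) =====
-- stated objective: alternative
-- what changed: A short-circuits: nested loops with a corrupted flag and double break mutate the first corruptible network dict in place and return the same object; B is a pure two-stage rebuild with no breaks and no mutation: stage 1 collects ALL corruptible (method,network) coordinates by exhaustive comprehension, stage 2 functionally reconstructs the whole structure around the first coordinate (index-compared maps and dict-unpacking), returning a fresh object; the fallback injection is likewise a pure rebuild.
-- outside the precondition, e.g. on _invalid_network_structure({'paymentMethods': [{}]}): A raises KeyError, B raises KeyError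
import Mathlib
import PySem

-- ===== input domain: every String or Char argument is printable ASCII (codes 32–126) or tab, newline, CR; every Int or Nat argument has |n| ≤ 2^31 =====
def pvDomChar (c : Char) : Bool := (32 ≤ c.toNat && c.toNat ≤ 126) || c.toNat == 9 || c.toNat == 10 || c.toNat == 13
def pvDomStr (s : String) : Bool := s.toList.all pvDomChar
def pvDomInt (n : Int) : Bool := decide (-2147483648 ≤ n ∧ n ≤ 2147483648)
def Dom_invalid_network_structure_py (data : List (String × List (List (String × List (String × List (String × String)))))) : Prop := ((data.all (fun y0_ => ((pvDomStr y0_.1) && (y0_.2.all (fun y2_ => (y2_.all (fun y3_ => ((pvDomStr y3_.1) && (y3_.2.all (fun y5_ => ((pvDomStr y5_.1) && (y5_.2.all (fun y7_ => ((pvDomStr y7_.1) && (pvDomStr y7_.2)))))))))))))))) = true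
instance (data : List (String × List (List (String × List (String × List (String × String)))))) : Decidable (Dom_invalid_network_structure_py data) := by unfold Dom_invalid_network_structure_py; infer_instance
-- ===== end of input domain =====

-- A mutates the first corruptible network dict in place (nested loops, corrupted flag, double
-- break) and returns the SAME object; B is a pure two-stage rebuild: stage 1 collects ALL
-- corruptible coordinates by exhaustive comprehension, stage 2 reconstructs the structure
-- functionally around the first one. The equivalence proved here is about the RETURN value
-- (B performs no in-place mutation).

-- a network's detail dict, the networks dict, a payment-method dict
abbrev PVDet := List (String × String)
abbrev PVNets := List (String × PVDet)
abbrev PVMethod := List (String × PVNets)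

-- module constant NETWORK_DEFINITIONS (shared by both Pythons)
def pvND : PySem.Dict String String := PySem.Dict.mk
  [("FedNow","banking"),("RTP","banking"),("ACH","banking"),("Zelle","zelle"),("Pix","pix"),
   ("Base","evm"),("Solana","solana"),("Ethereum","evm"),("Polygon","evm")]

-- the fallback bad Pix rail literal (appears in both Pythons)
def pvPixBad : PVDet := [("key","123"),("keyType","email"),("routingNumber","999")]

-- ===== PORT A =====
-- networks[net][field] = value  (item assignment on the inner detail dict)
def pvASetField (d : PVDet) (k v : String) : PVDet := ((PySem.Dict.mk d).insert k v).items

-- inner 'for net in networks: if/elif …; if corrupted: break' — some updated-networks if a net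
-- was corrupted, none if the loop fell through uncorrupted
def pvALoopNets : PVNets → Option PVNets
  | [] => none
  | (n, det) :: rest =>
    if pvND.get? n = some "pix" then some ((n, pvASetField det "routingNumber" "123456789") :: rest)
    else if pvND.get? n = some "evm" then some ((n, pvASetField det "routingNumber" "123456789") :: rest)
    else if pvND.get? n = some "solana" then some ((n, pvASetField det "routingNumber" "123456789") :: rest)
    else if pvND.get? n = some "zelle" then some ((n, pvASetField det "address" "0x1234567890abcdef") :: rest)
    else (pvALoopNets rest).map (fun r => (n, det) :: r)

-- outer 'for method in data.get("paymentMethods", []): …; if corrupted: break'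
def pvALoopMethods : List PVMethod → Option (List PVMethod)
  | [] => none
  | m :: rest =>
    match pvALoopNets ((PySem.Dict.mk m).getD "networks" []) with
    | some nets' => some (((PySem.Dict.mk m).insert "networks" nets').items :: rest)
    | none => (pvALoopMethods rest).map (fun r => m :: r)

def invalid_network_structure_py (data : List (String × List (List (String × List (String × List (String × String)))))) : List (String × List (List (String × List (String × List (String × String))))) :=
  match pvALoopMethods ((PySem.Dict.mk data).getD "paymentMethods" []) with
  | some pms' => ((PySem.Dict.mk data).insert "paymentMethods" pms').items
  | none =>
    if (PySem.Dict.mk data).contains "paymentMethods"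
        && decide (0 < ((PySem.Dict.mk data).getD "paymentMethods" []).length) then
      match (PySem.Dict.mk data).getD "paymentMethods" [] with
      | [] => data
      | m0 :: restm =>
        match (PySem.Dict.mk m0).get? "networks" with
        | none => data  -- Python raises KeyError here; excluded by Pre_
        | some nets =>
          ((PySem.Dict.mk data).insert "paymentMethods"
            ((((PySem.Dict.mk m0).insert "networks" ((PySem.Dict.mk nets).insert "Pix" pvPixBad).items).items) :: restm)).items
    else data

-- ===== PORT B =====
-- _corruption(t): the invalid (field, value) to inject for a corruptible network type, else None
def pvCorr : Option String → Option (String × String)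
  | none => none
  | some t =>
    if t == "zelle" then some ("address", "0x1234567890abcdef")
    else if t == "pix" || t == "evm" || t == "solana" then some ("routingNumber", "123456789")
    else none

-- stage 1: the comprehension collecting every corruptible (i, j) coordinate
def pvBHits (methods : List PVMethod) : List (Int × Int) :=
  (PySem.List.enumerate methods).flatMap (fun im =>
    (PySem.List.enumerate ((PySem.Dict.mk im.2).getD "networks" [])).filterMap (fun jn =>
      if (pvCorr (pvND.get? jn.2.1)).isSome then some (im.1, jn.1) else none))

-- fix_net(jj, net, det)
def pvBFixNet (j : Int) (jn : Int × (String × PVDet)) : String × PVDet :=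
  if jn.1 ≠ j then (jn.2.1, jn.2.2)
  else
    match pvCorr (pvND.get? jn.2.1) with
    | some fv => (jn.2.1, ((PySem.Dict.mk jn.2.2).insert fv.1 fv.2).items)
    | none => (jn.2.1, jn.2.2)  -- unreachable at the chosen coordinate (Python would raise unpacking None)

-- dict(gen of pairs): sequential insertion into a fresh dict
def pvDictOf (l : PVNets) : PVNets :=
  (l.foldl (fun d p => d.insert p.1 p.2) (PySem.Dict.mk [])).items

-- {**m, "networks": dict(fix_net(...) for ...)}   (m["networks"] is present at the hit method)
def pvBFixMethod (j : Int) (m : PVMethod) : PVMethod :=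
  ((PySem.Dict.mk m).insert "networks"
    (pvDictOf ((PySem.List.enumerate ((PySem.Dict.mk m).getD "networks" [])).map (pvBFixNet j)))).items

def invalid_network_structure_py_alt (data : List (String × List (List (String × List (String × List (String × String)))))) : List (String × List (List (String × List (String × List (String × String))))) :=
  let methods := (PySem.Dict.mk data).getD "paymentMethods" []
  match pvBHits methods with
  | ij :: _ =>
      ((PySem.Dict.mk data).insert "paymentMethods"
        ((PySem.List.enumerate methods).map (fun im =>
          if im.1 == ij.1 then pvBFixMethod ij.2 im.2 else im.2))).items
  | [] =>
    if (PySem.Dict.mk data).contains "paymentMethods" && decide (0 < methods.length) then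
      match methods with
      | [] => data
      | m0 :: restm =>
        match (PySem.Dict.mk m0).get? "networks" with
        | none => data  -- Python raises KeyError here; excluded by Pre_
        | some nets =>
          ((PySem.Dict.mk data).insert "paymentMethods"
            ((((PySem.Dict.mk m0).insert "networks" ((PySem.Dict.mk nets).insert "Pix" pvPixBad).items).items) :: restm)).items
    else data

-- ===== PRECONDITION & SPEC =====
-- A's KeyError situation: no corruptible network anywhere, paymentMethods nonempty, first method
-- has no "networks" key — both Pythons raise KeyError there.
def pvCrash (data : List (String × List (List (String × List (String × List (String × String)))))) : Bool :=
  match (PySem.Dict.mk data).getD "paymentMethods" [] with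
  | [] => false
  | m0 :: t => ((PySem.Dict.mk m0).get? "networks").isNone
      && (m0 :: t).all (fun m => ((PySem.Dict.mk m).getD "networks" ([] : PVNets)).all
           (fun q => !(["Zelle","Pix","Base","Solana","Ethereum","Polygon"] : List String).contains q.1))

-- Pre_ excludes (a) association-list encodings with duplicate keys in some dict, which do not
-- correspond to any Python dict input, and (b) the inputs on which both Pythons raise KeyError
-- (no corruptible network, paymentMethods nonempty, first method lacks a "networks" key).
def Pre_invalid_network_structure_py (data : List (String × List (List (String × List (String × List (String × String)))))) : Prop :=
  (data.map Prod.fst).Nodup ∧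
  (∀ p ∈ data, ∀ m ∈ p.2, (m.map Prod.fst).Nodup ∧
    ∀ q ∈ m, (q.2.map Prod.fst).Nodup ∧ ∀ r ∈ q.2, (r.2.map Prod.fst).Nodup) ∧
  pvCrash data = false
instance (data : List (String × List (List (String × List (String × List (String × String)))))) : Decidable (Pre_invalid_network_structure_py data) := by unfold Pre_invalid_network_structure_py; infer_instance

def pvWitness_invalid_network_structure_py : (List (String × List (List (String × List (String × List (String × String)))))) :=
  [("paymentMethods", [[("networks", [("Pix", [("key","1")])])]])]

def Spec_invalid_network_structure_py (data : List (String × List (List (String × List (String × List (String × String)))))) (out : List (String × List (List (String × List (String × List (String × String)))))) : Prop := out = invalid_network_structure_py_alt data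
instance (data : List (String × List (List (String × List (String × List (String × String)))))) (out : List (String × List (List (String × List (String × List (String × String)))))) : Decidable (Spec_invalid_network_structure_py data out) := by
  unfold Spec_invalid_network_structure_py
  have i2 : DecidableEq (List (String × String)) := fun a b => List.hasDecEq a b
  have i4 : DecidableEq (List (String × List (String × String))) := fun a b => List.hasDecEq a b
  have i6 : DecidableEq (List (String × List (String × List (String × String)))) := fun a b => List.hasDecEq a b
  have i7 : DecidableEq (List (List (String × List (String × List (String × String))))) := fun a b => List.hasDecEq a b
  have i9 : DecidableEq (List (String × List (List (String × List (String × List (String × String)))))) := fun a b => List.hasDecEq a b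
  exact i9 _ _

-- ===== CLAIM (what is proved, stated in full; the proofs are below) =====
def Claim_equal_invalid_network_structure_py : Prop := ∀ (data : List (String × List (List (String × List (String × List (String × String)))))), Dom_invalid_network_structure_py data → Pre_invalid_network_structure_py data → Spec_invalid_network_structure_py data (invalid_network_structure_py data)

-- ===== LEMMAS AND PROOFS =====

-- inner hit indices of one networks dict, enumeration starting at s
def pvInnerHits (s : Int) (nets : PVNets) : List Int :=
  (PySem.List.enumerate nets s).filterMap (fun jn =>
    if (pvCorr (pvND.get? jn.2.1)).isSome then some jn.1 else none)

-- B's hit list from an arbitrary outer enumeration start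
def pvBHitsFrom (s : Int) (ms : List PVMethod) : List (Int × Int) :=
  (PySem.List.enumerate ms s).flatMap (fun im =>
    (PySem.List.enumerate ((PySem.Dict.mk im.2).getD "networks" [])).filterMap (fun jn =>
      if (pvCorr (pvND.get? jn.2.1)).isSome then some (im.1, jn.1) else none))

theorem pvBHits_eq_from (ms : List PVMethod) : pvBHits ms = pvBHitsFrom 0 ms := rfl

-- NETWORK_DEFINITIONS.get takes one of six values
theorem pvND_cases (n : String) :
    pvND.get? n = none ∨ pvND.get? n = some "banking" ∨ pvND.get? n = some "zelle" ∨
    pvND.get? n = some "pix" ∨ pvND.get? n = some "evm" ∨ pvND.get? n = some "solana" := by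
  simp only [pvND, PySem.Dict.get?_mk_cons]
  split_ifs
  all_goals first
    | exact Or.inl rfl
    | exact Or.inr (Or.inl rfl)
    | exact Or.inr (Or.inr (Or.inl rfl))
    | exact Or.inr (Or.inr (Or.inr (Or.inl rfl)))
    | exact Or.inr (Or.inr (Or.inr (Or.inr (Or.inl rfl))))
    | exact Or.inr (Or.inr (Or.inr (Or.inr (Or.inr rfl))))

-- every inner hit index is ≥ the enumeration start
theorem pvInnerHits_bound {s j : Int} {nets : PVNets} (h : j ∈ pvInnerHits s nets) : s ≤ j := by
  unfold pvInnerHits at h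
  rw [List.mem_filterMap] at h
  obtain ⟨jn, hmem, hj⟩ := h
  rw [PySem.List.mem_enumerate_iff] at hmem
  obtain ⟨k, hk, rfl⟩ := hmem
  split at hj
  · have h2 := Option.some.inj hj
    omega
  · simp at hj

-- every outer hit's method index is ≥ the enumeration start
theorem pvBHitsFrom_bound {s : Int} {p : Int × Int} {ms : List PVMethod}
    (h : p ∈ pvBHitsFrom s ms) : s ≤ p.1 := by
  unfold pvBHitsFrom at h
  rw [List.mem_flatMap] at h
  obtain ⟨im, hmem, hp⟩ := h
  rw [List.mem_filterMap] at hp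
  obtain ⟨jn, _, hj⟩ := hp
  rw [PySem.List.mem_enumerate_iff] at hmem
  obtain ⟨k, hk, rfl⟩ := hmem
  split at hj
  · have h2 := Option.some.inj hj
    subst h2
    change s ≤ s + (k : Int)
    omega
  · simp at hj

-- fix_net preserves the network name
theorem pvBFixNet_fst (j : Int) (jn : Int × (String × PVDet)) : (pvBFixNet j jn).1 = jn.2.1 := by
  unfold pvBFixNet
  split_ifs with h
  · rfl
  · cases pvCorr (pvND.get? jn.2.1) <;> rfl

-- the rebuilt networks list has the original keys
theorem pvBFix_keys (nets : PVNets) (s j : Int) :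
    (((PySem.List.enumerate nets s).map (pvBFixNet j)).map Prod.fst) = nets.map Prod.fst := by
  rw [List.map_map]
  have h1 : ((PySem.List.enumerate nets s).map (Prod.fst ∘ pvBFixNet j))
      = (PySem.List.enumerate nets s).map (fun p => p.2.1) := by
    apply List.map_congr_left
    intro p _
    exact pvBFixNet_fst j p
  rw [h1]
  have h2 : (PySem.List.enumerate nets s).map (fun p => p.2.1)
      = ((PySem.List.enumerate nets s).map Prod.snd).map Prod.fst := by
    rw [List.map_map]; rfl
  rw [h2, PySem.List.map_snd_enumerate]

-- dict() over pairs with distinct keys is the identity on the association list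
theorem pvDictOf_nodup (l : PVNets) (h : (l.map Prod.fst).Nodup) : pvDictOf l = l := by
  unfold pvDictOf
  have := PySem.Dict.items_foldl_insert_fresh (l := l) (k := Prod.fst) (v := Prod.snd)
    (d := PySem.Dict.mk []) (by intro a _; rfl) h
  simpa using this

-- an indexed rewrite whose index lies below the enumeration start touches nothing
theorem pvBFix_skip (nets : PVNets) (s j : Int) (h : j < s) :
    (PySem.List.enumerate nets s).map (pvBFixNet j) = nets := by
  have h1 : (PySem.List.enumerate nets s).map (pvBFixNet j)
      = (PySem.List.enumerate nets s).map Prod.snd := by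
    apply List.map_congr_left
    intro p hp
    rw [PySem.List.mem_enumerate_iff] at hp
    obtain ⟨k, hk, rfl⟩ := hp
    unfold pvBFixNet
    rw [if_pos (by simp only [ne_eq]; omega)]
  rw [h1, PySem.List.map_snd_enumerate]

-- A's inner loop = first inner hit + indexed pure rewrite
theorem pv_inner_eq (nets : PVNets) : ∀ (s : Int),
    pvALoopNets nets
      = (pvInnerHits s nets).head?.map (fun j => (PySem.List.enumerate nets s).map (pvBFixNet j)) := by
  induction nets with
  | nil => intro s; simp [pvALoopNets, pvInnerHits]
  | cons p rest ih =>
    intro s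
    obtain ⟨n, det⟩ := p
    have hcons : PySem.List.enumerate ((n, det) :: rest) s
        = (s, (n, det)) :: PySem.List.enumerate rest (s + 1) := PySem.List.enumerate_cons _ _ _
    have corrupt_case : ∀ (ty fld v : String), pvND.get? n = some ty →
        pvCorr (some ty) = some (fld, v) →
        pvALoopNets ((n, det) :: rest) = some ((n, pvASetField det fld v) :: rest) →
        pvALoopNets ((n, det) :: rest)
          = (pvInnerHits s ((n, det) :: rest)).head?.map
              (fun j => (PySem.List.enumerate ((n, det) :: rest) s).map (pvBFixNet j)) := by
      intro ty fld v hty hcv hA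
      have hc : (pvCorr (pvND.get? n)).isSome = true := by rw [hty, hcv]; rfl
      have hhits : pvInnerHits s ((n, det) :: rest) = s :: pvInnerHits (s + 1) rest := by
        unfold pvInnerHits
        rw [hcons, List.filterMap_cons]
        simp only [hc, if_pos]
      rw [hA, hhits]
      simp only [List.head?_cons, Option.map_some]
      congr 1
      rw [hcons, List.map_cons]
      have hhead : pvBFixNet s (s, (n, det)) = (n, pvASetField det fld v) := by
        unfold pvBFixNet
        rw [if_neg (by simp)]
        simp only [hty, hcv]
        rfl
      rw [hhead, pvBFix_skip rest (s + 1) s (by omega)]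
    have plain_case : pvCorr (pvND.get? n) = none →
        pvALoopNets ((n, det) :: rest) = (pvALoopNets rest).map (fun r => (n, det) :: r) →
        pvALoopNets ((n, det) :: rest)
          = (pvInnerHits s ((n, det) :: rest)).head?.map
              (fun j => (PySem.List.enumerate ((n, det) :: rest) s).map (pvBFixNet j)) := by
      intro hc hA
      have hhits : pvInnerHits s ((n, det) :: rest) = pvInnerHits (s + 1) rest := by
        unfold pvInnerHits
        rw [hcons, List.filterMap_cons]
        simp only [hc, Option.isSome_none, Bool.false_eq_true]
        simp
      rw [hA, ih (s + 1), hhits]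
      cases hh : (pvInnerHits (s + 1) rest).head? with
      | none => simp
      | some j =>
        have hjmem : j ∈ pvInnerHits (s + 1) rest := List.mem_of_mem_head? hh
        have hjge : s + 1 ≤ j := pvInnerHits_bound hjmem
        simp only [Option.map_some]
        congr 1
        rw [hcons, List.map_cons]
        congr 1
        unfold pvBFixNet
        rw [if_pos (by simp only [ne_eq]; omega)]
    rcases pvND_cases n with h|h|h|h|h|h
    · exact plain_case (by rw [h]; rfl) (by simp [pvALoopNets, h])
    · exact plain_case (by rw [h]; rfl) (by simp [pvALoopNets, h])
    · exact corrupt_case "zelle" "address" "0x1234567890abcdef" h rfl (by simp [pvALoopNets, h])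
    · exact corrupt_case "pix" "routingNumber" "123456789" h rfl (by simp [pvALoopNets, h])
    · exact corrupt_case "evm" "routingNumber" "123456789" h rfl (by simp [pvALoopNets, h])
    · exact corrupt_case "solana" "routingNumber" "123456789" h rfl (by simp [pvALoopNets, h])

-- pair-tagging an inner filterMap
theorem pv_filterMap_pair (l : List (Int × (String × PVDet))) (i : Int) :
    l.filterMap (fun jn => if (pvCorr (pvND.get? jn.2.1)).isSome then some (i, jn.1) else none)
      = (l.filterMap (fun jn => if (pvCorr (pvND.get? jn.2.1)).isSome then some jn.1 else none)).map
          (fun j => (i, j)) := by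
  induction l with
  | nil => rfl
  | cons jn rest ih =>
    rw [List.filterMap_cons, List.filterMap_cons]
    by_cases hc : (pvCorr (pvND.get? jn.2.1)).isSome
    · simp only [hc, if_pos, List.map_cons, ih]
    · simp only [hc, Bool.false_eq_true]
      exact ih

-- an outer indexed rewrite whose index lies below the enumeration start touches nothing
theorem pvBFixM_skip (ms : List PVMethod) (s i j : Int) (h : i < s) :
    (PySem.List.enumerate ms s).map (fun im => if im.1 == i then pvBFixMethod j im.2 else im.2) = ms := by
  have h1 : (PySem.List.enumerate ms s).map (fun im => if im.1 == i then pvBFixMethod j im.2 else im.2)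
      = (PySem.List.enumerate ms s).map Prod.snd := by
    apply List.map_congr_left
    intro p hp
    rw [PySem.List.mem_enumerate_iff] at hp
    obtain ⟨k, hk, rfl⟩ := hp
    simp only
    rw [if_neg (by simp only [beq_iff_eq]; omega)]
  rw [h1, PySem.List.map_snd_enumerate]

-- A's outer loop = first hit coordinate + indexed pure rebuild
theorem pv_outer_eq (ms : List PVMethod)
    (hnd : ∀ m ∈ ms, ((((PySem.Dict.mk m).getD "networks" ([] : PVNets)).map Prod.fst).Nodup)) :
    ∀ (s : Int),
    pvALoopMethods ms
      = (pvBHitsFrom s ms).head?.map (fun ij =>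
          (PySem.List.enumerate ms s).map (fun im =>
            if im.1 == ij.1 then pvBFixMethod ij.2 im.2 else im.2)) := by
  induction ms with
  | nil => intro s; simp [pvALoopMethods, pvBHitsFrom]
  | cons m rest ih =>
    intro s
    have hmn := hnd m (by simp)
    have hrest : ∀ m' ∈ rest, ((((PySem.Dict.mk m').getD "networks" ([] : PVNets)).map Prod.fst).Nodup) :=
      fun m' hm' => hnd m' (by simp [hm'])
    have hcons : PySem.List.enumerate (m :: rest) s
        = (s, m) :: PySem.List.enumerate rest (s + 1) := PySem.List.enumerate_cons _ _ _
    have hflat : pvBHitsFrom s (m :: rest)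
        = (pvInnerHits 0 ((PySem.Dict.mk m).getD "networks" [])).map (fun j => (s, j))
            ++ pvBHitsFrom (s + 1) rest := by
      unfold pvBHitsFrom
      rw [hcons, List.flatMap_cons]
      congr 1
      exact pv_filterMap_pair _ s
    simp only [pvALoopMethods]
    rw [pv_inner_eq ((PySem.Dict.mk m).getD "networks" []) 0, hflat]
    cases hh : (pvInnerHits 0 ((PySem.Dict.mk m).getD "networks" [])).head? with
    | some j =>
      have hj : ∃ t, pvInnerHits 0 ((PySem.Dict.mk m).getD "networks" []) = j :: t := by
        cases he : pvInnerHits 0 ((PySem.Dict.mk m).getD "networks" []) with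
        | nil => rw [he] at hh; simp at hh
        | cons a t => rw [he] at hh; simp at hh; exact ⟨t, by rw [hh]⟩
      obtain ⟨t, ht⟩ := hj
      rw [ht]
      simp only [Option.map_some, List.map_cons, List.cons_append, List.head?_cons]
      congr 1
      rw [hcons, List.map_cons]
      have hhead : (if (s : Int) == s then pvBFixMethod j m else m) = ((PySem.Dict.mk m).insert "networks" ((PySem.List.enumerate ((PySem.Dict.mk m).getD "networks" []) 0).map (pvBFixNet j))).items := by
        rw [if_pos (by simp)]
        unfold pvBFixMethod
        rw [pvDictOf_nodup _ (by rw [pvBFix_keys]; exact hmn)]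
      rw [hhead, pvBFixM_skip rest (s + 1) s j (by omega)]
    | none =>
      have hnil : pvInnerHits 0 ((PySem.Dict.mk m).getD "networks" []) = [] := by
        cases he : pvInnerHits 0 ((PySem.Dict.mk m).getD "networks" []) with
        | nil => rfl
        | cons a t => rw [he] at hh; simp at hh
      rw [hnil]
      simp only [Option.map_none, List.map_nil, List.nil_append]
      rw [ih hrest (s + 1)]
      cases hf : (pvBHitsFrom (s + 1) rest).head? with
      | none => simp
      | some ij =>
        have hijmem : ij ∈ pvBHitsFrom (s + 1) rest := List.mem_of_mem_head? hf
        have hige : s + 1 ≤ ij.1 := pvBHitsFrom_bound hijmem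
        simp only [Option.map_some]
        congr 1
        rw [hcons, List.map_cons]
        congr 1
        rw [if_neg (by simp only [beq_iff_eq]; omega)]

-- ===== VERDICT (by name: the statement is the Claim_ definition above) =====
theorem invalid_network_structure_py_spec : Claim_equal_invalid_network_structure_py := by
  intro data _hdom hpre
  obtain ⟨_hd0, hd1, _hcr⟩ := hpre
  unfold Spec_invalid_network_structure_py
  unfold invalid_network_structure_py invalid_network_structure_py_alt
  have hnd : ∀ m ∈ (PySem.Dict.mk data).getD "paymentMethods" [],
      (((PySem.Dict.mk m).getD "networks" ([] : PVNets)).map Prod.fst).Nodup := by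
    intro m hm
    have hpm : ∃ pms, (PySem.Dict.mk data).get? "paymentMethods" = some pms ∧ m ∈ pms := by
      rw [PySem.Dict.getD_eq_get?_getD] at hm
      cases hq : (PySem.Dict.mk data).get? "paymentMethods" with
      | none => rw [hq] at hm; simp at hm
      | some pms => exact ⟨pms, rfl, by rw [hq] at hm; simpa using hm⟩
    obtain ⟨pms, hq, hmem⟩ := hpm
    have hmem2 : ("paymentMethods", pms) ∈ data := PySem.Dict.mem_items_of_get?_eq_some _ hq
    have hm1 := hd1 _ hmem2 m hmem
    rw [PySem.Dict.getD_eq_get?_getD]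
    cases hq2 : (PySem.Dict.mk m).get? "networks" with
    | none => simp
    | some nets =>
      have hmem3 : ("networks", nets) ∈ m := PySem.Dict.mem_items_of_get?_eq_some _ hq2
      simpa using (hm1.2 _ hmem3).1
  rw [pv_outer_eq _ hnd 0]
  simp only [pvBHits_eq_from]
  cases hf : pvBHitsFrom 0 ((PySem.Dict.mk data).getD "paymentMethods" []) with
  | nil => rfl
  | cons ij t => rfl
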